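-- pv_equiv track=rewrite | github.com/niklasbaumgardner/adventOfCode | 2024/19.py | check_design_count
-- ===== SOURCE A (Python) =====
-- def check_design_count(towels, pattern, cache):
--     if len(pattern) == 0:
--         return 1
--
--     if pattern in cache:
--         return cache[pattern]
--
--     count = 0
--     for t in towels:
--         if pattern.startswith(t):
--             count += check_design_count(towels, pattern[len(t) :], cache)
--
--     cache[pattern] = count
--     return cache[pattern]
-- ===== SOURCE B (Python) =====
-- def check_design_count(towels, pattern, cache):
--     # Bottom-up DP over suffixes (iterative), instead of A's top-down memoized
--     # recursion.  Return value only: A also writes new entries into `cache`,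
--     # B never mutates it.
--     n = len(pattern)
--     dp = [0] * (n + 1)
--     dp[n] = 1
--     for i in range(n - 1, -1, -1):
--         suf = pattern[i:]
--         if suf in cache:
--             dp[i] = cache[suf]
--         else:
--             total = 0
--             for t in towels:
--                 if suf.startswith(t):
--                     total += dp[i + len(t)]
--             dp[i] = total
--     return dp[0]
-- ===== Notes on version B (the rewrite author's own statement) =====
-- stated objective: alternative
-- what changed: Replaces A's top-down memoized recursion (which writes every computed suffix into the shared cache dict) by an iterative bottom-up DP array over the suffixes of the pattern, consulting the given cache read-only; return-value equivalence only, since A mutates cache and B does not.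
import Mathlib
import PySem

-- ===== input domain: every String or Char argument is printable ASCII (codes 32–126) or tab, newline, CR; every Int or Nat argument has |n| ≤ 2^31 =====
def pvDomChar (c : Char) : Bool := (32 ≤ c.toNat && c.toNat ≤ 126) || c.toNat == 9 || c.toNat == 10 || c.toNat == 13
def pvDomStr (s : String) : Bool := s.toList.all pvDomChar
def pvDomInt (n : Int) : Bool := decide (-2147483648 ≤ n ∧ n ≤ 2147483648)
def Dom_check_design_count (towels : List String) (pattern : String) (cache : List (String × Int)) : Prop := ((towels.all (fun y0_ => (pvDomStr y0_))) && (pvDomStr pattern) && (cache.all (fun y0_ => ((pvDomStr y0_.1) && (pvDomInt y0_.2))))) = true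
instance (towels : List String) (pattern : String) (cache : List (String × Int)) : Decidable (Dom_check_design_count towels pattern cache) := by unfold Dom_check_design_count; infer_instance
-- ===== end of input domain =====

-- B is a bottom-up DP over suffixes instead of A's memoized recursion; return value
-- only: A inserts computed suffixes into the cache dict, B reads the cache and never writes it.

-- ===== PORT A =====
-- the recursion of A, with the cache threaded through (Python mutates it in place);
-- fuel only makes the recursion structural: on Pre_ inputs every matched towel is
-- non-empty, so the pattern shrinks and pattern.length + 1 fuel is never exhausted
def aGo (towels : List String) : Nat → String → PySem.Dict String Int → Int × PySem.Dict String Int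
  | 0, _, c => (0, c)
  | fuel+1, p, c =>
    if PySem.Str.len p = 0 then (1, c)
    else
      match PySem.Dict.get? c p with
      | some v => (v, c)              -- `if pattern in cache: return cache[pattern]`
      | none =>
        let r := towels.foldl (fun (acc : Int × PySem.Dict String Int) t =>
            if PySem.Str.startswith p t then
              let s := aGo towels fuel (PySem.Str.slice p (some (PySem.Str.len t)) none) acc.2
              (acc.1 + s.1, s.2)
            else acc) ((0 : Int), c)
        let c2 := PySem.Dict.insert r.2 p r.1       -- cache[pattern] = count
        ((PySem.Dict.get? c2 p).getD 0, c2)         -- return cache[pattern] (key just inserted)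
  termination_by fuel _ _ => fuel

def check_design_count (towels : List String) (pattern : String) (cache : List (String × Int)) : Int :=
  (aGo towels (pattern.toList.length + 1) pattern (PySem.Dict.mk cache)).1

-- ===== PORT B =====
-- Source B's dp array, built back to front: `bGo … m` is [dp[n-m], …, dp[n]] (suffix
-- lengths m down to 0); dp[i + len(t)] is position len(t) in (0 :: dp), the 0 being
-- dp[i], still 0 in Source B when it is read
def bGo (towels : List String) (pat : List Char) (c : PySem.Dict String Int) : Nat → List Int
  | 0 => [1]
  | m+1 =>
    let dp := bGo towels pat c m
    let suf := String.ofList (pat.drop (pat.length - (m+1)))     -- pattern[i:], i = n-(m+1)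
    let v :=
      match PySem.Dict.get? c suf with
      | some v => v
      | none =>
        towels.foldl (fun (acc : Int) t =>
          if PySem.Str.startswith suf t then
            acc + (((0:Int) :: dp).getD (PySem.Str.len t).toNat 0)
          else acc) 0
    v :: dp

def check_design_count_alt (towels : List String) (pattern : String) (cache : List (String × Int)) : Int :=
  (bGo towels pattern.toList (PySem.Dict.mk cache) pattern.toList.length).getD 0 0

-- ===== PRECONDITION & SPEC =====
-- Pre_ excludes exactly the inputs on which A raises RecursionError: an empty towel
-- makes A recurse on the unchanged pattern unless it returns at once (empty pattern
-- or a cache hit).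
def Pre_check_design_count (towels : List String) (pattern : String) (cache : List (String × Int)) : Prop :=
  ("" : String) ∈ towels → pattern = "" ∨ pattern ∈ (PySem.Dict.mk cache).keys
instance (towels : List String) (pattern : String) (cache : List (String × Int)) : Decidable (Pre_check_design_count towels pattern cache) := by unfold Pre_check_design_count; infer_instance

def pvWitness_check_design_count : List String × String × (List (String × Int)) :=
  (["r", "wr", "b", "br"], "brwr", [("wr", 2)])

def Spec_check_design_count (towels : List String) (pattern : String) (cache : List (String × Int)) (out : Int) : Prop := out = check_design_count_alt towels pattern cache
instance (towels : List String) (pattern : String) (cache : List (String × Int)) (out : Int) : Decidable (Spec_check_design_count towels pattern cache out) := by unfold Spec_check_design_count; infer_instance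

-- ===== CLAIM (what is proved, stated in full; the proofs are below) =====
def Claim_equal_check_design_count : Prop := ∀ (towels : List String) (pattern : String) (cache : List (String × Int)), Dom_check_design_count towels pattern cache → Pre_check_design_count towels pattern cache → Spec_check_design_count towels pattern cache (check_design_count towels pattern cache)

-- ===== LEMMAS AND PROOFS =====

-- the suffix of `pat` of length m, as a String (for m ≤ pat.length)
def sufS (pat : List Char) (m : Nat) : String := String.ofList (pat.drop (pat.length - m))

-- the value Source B's dp holds for the suffix of length m
def gV (towels : List String) (pat : List Char) (c : PySem.Dict String Int) (m : Nat) : Int :=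
  (bGo towels pat c m).getD 0 0

lemma toList_sufS (pat : List Char) (m : Nat) : (sufS pat m).toList = pat.drop (pat.length - m) := by
  simp [sufS]

lemma length_sufS (pat : List Char) (m : Nat) (h : m ≤ pat.length) :
    (sufS pat m).toList.length = m := by
  simp [toList_sufS]; omega

lemma sufS_inj (pat : List Char) {m m' : Nat} (h : m ≤ pat.length) (h' : m' ≤ pat.length)
    (he : sufS pat m = sufS pat m') : m = m' := by
  have := congrArg (fun s => s.toList.length) he
  simpa [length_sufS pat m h, length_sufS pat m' h'] using this

lemma bGo_getD (towels : List String) (pat : List Char) (c : PySem.Dict String Int) :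
    ∀ j m, j ≤ m → (bGo towels pat c m).getD j 0 = gV towels pat c (m - j) := by
  intro j
  induction j with
  | zero => intro m _; simp [gV]
  | succ j ih =>
    intro m hm
    obtain ⟨m', rfl⟩ : ∃ m', m = m' + 1 := ⟨m - 1, by omega⟩
    have h : (bGo towels pat c (m' + 1)).getD (j+1) 0 = (bGo towels pat c m').getD j 0 := by
      conv_lhs => rw [bGo]
      exact List.getD_cons_succ
    rw [h, ih m' (by omega)]
    congr 1
    omega

-- the invariant A's evolving cache satisfies
def InvC (towels : List String) (pat : List Char) (c0 c : PySem.Dict String Int) : Prop :=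
  ∀ m : Nat, 1 ≤ m → m ≤ pat.length →
    (∀ v, PySem.Dict.get? c0 (sufS pat m) = some v → PySem.Dict.get? c (sufS pat m) = some v) ∧
    (∀ v, PySem.Dict.get? c (sufS pat m) = some v → v = gV towels pat c0 m)

lemma startswith_le {s p : String} (h : PySem.Str.startswith s p = true) :
    p.toList.length ≤ s.toList.length := by
  rw [PySem.Str.startswith_eq] at h
  exact ((PySem.Chars.startswith_iff _ _).mp h).length_le

lemma aGo_g (towels : List String) (pat : List Char) (c0 : PySem.Dict String Int)
    (hE : ("" : String) ∉ towels) :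
    ∀ fuel m c, m ≤ pat.length → m < fuel → InvC towels pat c0 c →
      (aGo towels fuel (sufS pat m) c).1 = gV towels pat c0 m ∧
      InvC towels pat c0 (aGo towels fuel (sufS pat m) c).2 := by
  intro fuel
  induction fuel with
  | zero => intro m c hm hf _; omega
  | succ fuel ih =>
    intro m c hm hf hInv
    match m, hm with
    | 0, hm =>
      have hlen : PySem.Str.len (sufS pat 0) = 0 := by
        simp [PySem.Str.len_eq, toList_sufS]
      rw [aGo]
      simp only [hlen]
      exact ⟨by simp [gV, bGo], hInv⟩
    | m'+1, hm =>
      have hplen : PySem.Str.len (sufS pat (m'+1)) = ((m'+1 : Nat) : Int) := by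
        rw [PySem.Str.len_eq, length_sufS pat (m'+1) hm]
      rw [aGo]
      rw [if_neg (by rw [hplen]; omega)]
      cases hc : PySem.Dict.get? c (sufS pat (m'+1)) with
      | some v =>
        simp only
        exact ⟨(hInv (m'+1) (by omega) hm).2 v hc, hInv⟩
      | none =>
        simp only
        -- the fold over the towels, with the cache threaded through
        have fold : ∀ ts : List String, (∀ t ∈ ts, t ∈ towels) → ∀ (acc : Int) (c' : PySem.Dict String Int),
            InvC towels pat c0 c' →
            (ts.foldl (fun (acc : Int × PySem.Dict String Int) t =>
                if PySem.Str.startswith (sufS pat (m'+1)) t then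
                  let s := aGo towels fuel (PySem.Str.slice (sufS pat (m'+1)) (some (PySem.Str.len t)) none) acc.2
                  (acc.1 + s.1, s.2)
                else acc) (acc, c')).1
              = acc + (ts.map (fun t => if PySem.Str.startswith (sufS pat (m'+1)) t then
                  gV towels pat c0 (m'+1 - (PySem.Str.len t).toNat) else 0)).sum ∧
            InvC towels pat c0 ((ts.foldl (fun (acc : Int × PySem.Dict String Int) t =>
                if PySem.Str.startswith (sufS pat (m'+1)) t then
                  let s := aGo towels fuel (PySem.Str.slice (sufS pat (m'+1)) (some (PySem.Str.len t)) none) acc.2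
                  (acc.1 + s.1, s.2)
                else acc) (acc, c'))).2 := by
          intro ts
          induction ts with
          | nil => intro _ acc c' h; exact ⟨by simp, h⟩
          | cons t ts iht =>
            intro hsub acc c' hInv'
            by_cases hsw : PySem.Str.startswith (sufS pat (m'+1)) t = true
            · have htne : t.toList ≠ [] := by
                intro hn
                have ht0 : t = "" := String.toList_inj.mp (by rw [hn]; rfl)
                exact hE (ht0 ▸ hsub t (by simp))
              have hℓ1 : 1 ≤ (PySem.Str.len t).toNat := by
                rw [PySem.Str.len_eq]
                cases h : t.toList with
                | nil => exact absurd h htne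
                | cons a l => simp
              have hℓle : (PySem.Str.len t).toNat ≤ m' + 1 := by
                have := startswith_le hsw
                rw [length_sufS pat (m'+1) hm] at this
                rw [PySem.Str.len_eq]
                simpa using this
              have hslice : PySem.Str.slice (sufS pat (m'+1)) (some (PySem.Str.len t)) none
                  = sufS pat (m'+1 - (PySem.Str.len t).toNat) := by
                apply String.toList_inj.mp
                have h0 : (0:Int) ≤ PySem.Str.len t := by rw [PySem.Str.len_eq]; positivity
                rw [toList_sufS]
                simp only [PySem.Str.toList_slice, PySem.Chars.slice_eq_listSlice,
                  PySem.List.slice_from _ h0]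
                rw [toList_sufS, List.drop_drop]
                congr 1
                omega
              have hrec := ih (m'+1 - (PySem.Str.len t).toNat) c' (by omega) (by omega) hInv'
              rw [← hslice] at hrec
              simp only [List.foldl_cons, if_pos hsw]
              have := iht (fun x hx => hsub x (List.mem_cons_of_mem _ hx))
                (acc + (aGo towels fuel (PySem.Str.slice (sufS pat (m'+1)) (some (PySem.Str.len t)) none) c').1)
                (aGo towels fuel (PySem.Str.slice (sufS pat (m'+1)) (some (PySem.Str.len t)) none) c').2 hrec.2
              refine ⟨?_, this.2⟩
              rw [this.1, hrec.1]
              simp only [List.map_cons, List.sum_cons, if_pos hsw]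
              ring
            · simp only [List.foldl_cons, if_neg hsw]
              have := iht (fun x hx => hsub x (List.mem_cons_of_mem _ hx)) acc c' hInv'
              refine ⟨?_, this.2⟩
              rw [this.1]
              simp only [List.map_cons, List.sum_cons, if_neg hsw, zero_add]
        have hfold := fold towels (fun _ h => h) 0 c hInv
        have hc0 : PySem.Dict.get? c0 (sufS pat (m'+1)) = none := by
          cases h0 : PySem.Dict.get? c0 (sufS pat (m'+1)) with
          | none => rfl
          | some v =>
            exact absurd ((hInv (m'+1) (by omega) hm).1 v h0) (by rw [hc]; simp)
        -- Source B computes the same sum for this suffix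
        have hg : gV towels pat c0 (m'+1)
            = (towels.map (fun t => if PySem.Str.startswith (sufS pat (m'+1)) t then
                gV towels pat c0 (m'+1 - (PySem.Str.len t).toNat) else 0)).sum := by
          have hkey : String.ofList (pat.drop (pat.length - (m'+1))) = sufS pat (m'+1) := rfl
          simp only [gV]
          conv_lhs => rw [bGo]
          simp only [hkey, hc0, List.getD_cons_zero]
          have hstep : (fun (acc : Int) t =>
              if PySem.Str.startswith (sufS pat (m'+1)) t then
                acc + (((0:Int) :: bGo towels pat c0 m').getD (PySem.Str.len t).toNat 0)
              else acc)
            = fun (acc : Int) t => acc + (if PySem.Str.startswith (sufS pat (m'+1)) t then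
                (((0:Int) :: bGo towels pat c0 m').getD (PySem.Str.len t).toNat 0) else 0) := by
            funext acc t; split <;> simp
          rw [hstep, PySem.List.foldl_add]
          simp only [zero_add]
          apply congrArg
          apply List.map_congr_left
          intro t ht
          by_cases hsw : PySem.Str.startswith (sufS pat (m'+1)) t = true
          · rw [if_pos hsw, if_pos hsw]
            have htne : t.toList ≠ [] := by
              intro hn
              apply hE
              have : t = "" := String.toList_inj.mp (by rw [hn]; rfl)
              rwa [this] at ht
            have hℓ1 : 1 ≤ (PySem.Str.len t).toNat := by
              rw [PySem.Str.len_eq]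
              cases h : t.toList with
              | nil => exact absurd h htne
              | cons a l => simp
            have hℓle : (PySem.Str.len t).toNat ≤ m' + 1 := by
              have := startswith_le hsw
              rw [length_sufS pat (m'+1) hm] at this
              rw [PySem.Str.len_eq]
              simpa using this
            obtain ⟨ℓ', hℓ'⟩ : ∃ ℓ', (PySem.Str.len t).toNat = ℓ' + 1 := ⟨(PySem.Str.len t).toNat - 1, by omega⟩
            rw [hℓ', List.getD_cons_succ, bGo_getD towels pat c0 ℓ' m' (by omega)]
            congr 1
            omega
          · rw [if_neg hsw, if_neg hsw]
        refine ⟨?_, ?_⟩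
        · rw [hfold.1, PySem.Dict.get?_insert_self]
          rw [hg]
          simp
        · -- the invariant survives the insertion of this suffix
          intro m'' h1 h2
          by_cases hmm : m'' = m' + 1
          · subst hmm
            constructor
            · intro v hv; exact absurd hv (by rw [hc0]; simp)
            · intro v hv
              rw [PySem.Dict.get?_insert_self] at hv
              cases hv
              rw [hfold.1, hg]
              simp
          · have hne : sufS pat m'' ≠ sufS pat (m'+1) := fun h => hmm (sufS_inj pat h2 hm h)
            constructor
            · intro v hv
              rw [PySem.Dict.get?_insert _ _ _ _, if_neg hne]
              exact (hfold.2 m'' h1 h2).1 v hv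
            · intro v hv
              rw [PySem.Dict.get?_insert _ _ _ _, if_neg hne] at hv
              exact (hfold.2 m'' h1 h2).2 v hv

theorem check_design_count_spec : Claim_equal_check_design_count := by
  intro towels pattern cache hDom hPre
  unfold Spec_check_design_count check_design_count check_design_count_alt
  by_cases hE : ("" : String) ∈ towels
  · -- an empty towel is allowed by Pre_ only when A returns at once
    by_cases hp : pattern = ""
    · subst hp
      simp [aGo, PySem.Str.len_eq, bGo]
    · have hkey : pattern ∈ (PySem.Dict.mk cache).keys := (hPre hE).resolve_left hp
      obtain ⟨v, hv⟩ : ∃ v, PySem.Dict.get? (PySem.Dict.mk cache) pattern = some v := by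
        cases h : PySem.Dict.get? (PySem.Dict.mk cache) pattern with
        | none => exact absurd hkey ((PySem.Dict.get?_eq_none_iff_not_mem_keys _ _).mp h)
        | some v => exact ⟨v, rfl⟩
      have htne : pattern.toList ≠ [] := by
        intro hn; exact hp (String.toList_inj.mp (by rw [hn]; rfl))
      obtain ⟨m, hm⟩ : ∃ m, pattern.toList.length = m + 1 := by
        cases h : pattern.toList with
        | nil => exact absurd h htne
        | cons a l => exact ⟨l.length, by simp⟩
      rw [hm, aGo]
      rw [if_neg (by rw [PySem.Str.len_eq, hm]; omega)]
      have hsuf : String.ofList (pattern.toList.drop (pattern.toList.length - (m+1)))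
          = pattern := by
        rw [hm]; simp [String.ofList_toList]
      rw [hv]
      conv_rhs => rw [bGo]
      rw [hsuf, hv]
      simp
  · have hInv0 : InvC towels pattern.toList (PySem.Dict.mk cache) (PySem.Dict.mk cache) := by
      intro m h1 h2
      refine ⟨fun v h => h, fun v hv => ?_⟩
      obtain ⟨m'', rfl⟩ : ∃ m'', m = m'' + 1 := ⟨m - 1, by omega⟩
      rw [sufS] at hv
      simp only [gV]
      conv_rhs => rw [bGo]
      rw [hv]
      simp
    have hpat : sufS pattern.toList pattern.toList.length = pattern := by
      rw [sufS, Nat.sub_self, List.drop_zero, String.ofList_toList]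
    have h := aGo_g towels pattern.toList (PySem.Dict.mk cache) hE
      (pattern.toList.length + 1) pattern.toList.length (PySem.Dict.mk cache)
      le_rfl (by omega) hInv0
    rw [hpat] at h
    exact h.1
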